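-- pv_equiv track=rewrite | github.com/Scworch/KeyDeck | plugins/Steam_Switcher/steam_switch.py | tokenize_vdf
-- ===== SOURCE A (Python) =====
-- def tokenize_vdf(text: str) -> list[str]:
--     tokens: list[str] = []
--     i = 0
--     n = len(text)
--     while i < n:
--         ch = text[i]
--         if ch.isspace():
--             i += 1
--             continue
--         if ch == "/" and i + 1 < n and text[i + 1] == "/":
--             while i < n and text[i] != "\n":
--                 i += 1
--             continue
--         if ch in "{}":
--             tokens.append(ch)
--             i += 1
--             continue
--         if ch == '"':
--             i += 1
--             buf: list[str] = []
--             while i < n: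
--                 c = text[i]
--                 if c == "\\" and i + 1 < n:
--                     buf.append(text[i + 1])
--                     i += 2
--                     continue
--                 if c == '"':
--                     i += 1
--                     break
--                 buf.append(c)
--                 i += 1
--             else:
--                 raise ValueError("Unclosed quote in VDF")
--             tokens.append("".join(buf))
--             continue
--         raise ValueError(f"Unexpected VDF character: {ch!r} at position {i}")
--     return tokens
-- ===== SOURCE B (Python) =====
-- def _unescape(raw: str) -> str:
--     out = []
--     k = 0
--     while k < len(raw):
--         if raw[k] == "\\" and k + 1 < len(raw):
--             out.append(raw[k + 1])
--             k += 2
--         else: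
--             out.append(raw[k])
--             k += 1
--     return "".join(out)
--
--
-- def _next_lexeme(text: str, pos: int):
--     """Maximal-munch scanner: return (token_or_None, new_pos) for the lexeme
--     starting at pos, or None if nothing matches there (lexical error)."""
--     n = len(text)
--     ch = text[pos]
--     if ch.isspace():
--         j = pos + 1
--         while j < n and text[j].isspace():
--             j += 1
--         return (None, j)
--     if text.startswith("//", pos):
--         j = text.find("\n", pos)
--         return (None, n if j < 0 else j)
--     if ch in "{}":
--         return (ch, pos + 1)
--     if ch == '"':
--         j = pos + 1
--         while j < n:
--             if text[j] == '"':
--                 return (_unescape(text[pos + 1:j]), j + 1)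
--             j += 2 if text[j] == "\\" else 1
--         return None
--     return None
--
--
-- def tokenize_vdf(text: str) -> list[str]:
--     tokens: list[str] = []
--     pos = 0
--     n = len(text)
--     while pos < n:
--         res = _next_lexeme(text, pos)
--         if res is None:
--             ch = text[pos]
--             if ch == '"':
--                 raise ValueError("Unclosed quote in VDF")
--             raise ValueError(f"Unexpected VDF character: {ch!r} at position {pos}")
--         tok, pos = res
--         if tok is not None:
--             tokens.append(tok)
--     return tokens
-- ===== Notes on version B (the rewrite author's own statement) =====
-- stated objective: alternative
-- what changed: A is one monolithic index loop that builds each string char by char; B is a maximal-munch scanner: a _next_lexeme helper returns one lexeme per call (whitespace run, comment via str.find, brace, or a whole quoted span located by jumping over escapes), and the raw string slice is unescaped in a separate pass.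
import Mathlib
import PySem

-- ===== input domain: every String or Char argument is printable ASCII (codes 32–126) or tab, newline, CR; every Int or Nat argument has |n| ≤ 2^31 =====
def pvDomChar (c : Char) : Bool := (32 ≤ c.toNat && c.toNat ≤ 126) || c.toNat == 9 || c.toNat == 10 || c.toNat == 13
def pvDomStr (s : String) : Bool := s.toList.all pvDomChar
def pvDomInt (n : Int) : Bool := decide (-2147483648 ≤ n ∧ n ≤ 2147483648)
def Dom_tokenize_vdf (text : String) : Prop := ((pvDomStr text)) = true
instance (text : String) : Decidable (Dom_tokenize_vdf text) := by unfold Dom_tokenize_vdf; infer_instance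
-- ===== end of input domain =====

-- B rewrites A's monolithic index loop as a maximal-munch scanner (one lexeme per call,
-- raw string span sliced then unescaped in a separate pass); same return value, same raises.

-- ===== PORT A =====
-- inner while of the '"' branch: returns some (buf, rest-after-closing-quote), none = fell off the end (unclosed)
def pvStrLoopA : List Char → List Char → Option (List Char × List Char)
  | _buf, [] => none
  | buf, '\\' :: d :: cs => pvStrLoopA (buf ++ [d]) cs
  | buf, '"' :: cs => some (buf, cs)
  | buf, c :: cs => pvStrLoopA (buf ++ [c]) cs

theorem pvStrLoopA_lt : ∀ (buf l b r : List Char), pvStrLoopA buf l = some (b, r) → r.length < l.length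
  | _, [], _, _, h => by simp [pvStrLoopA] at h
  | buf, '\\' :: d :: cs, b, r, h => by
      have := pvStrLoopA_lt (buf ++ [d]) cs b r h
      simp; omega
  | buf, '"' :: cs, b, r, h => by
      simp [pvStrLoopA] at h; simp [h.2.symm]
  | buf, c :: cs, b, r, h => by
      by_cases h1 : c = '\\' <;> by_cases h2 : c = '"'
      all_goals first
        | (exact absurd (h1.symm.trans h2) (by decide))
        | (subst h1; cases cs with
            | nil => simp [pvStrLoopA] at h
            | cons d cs' => have := pvStrLoopA_lt (buf ++ [d]) cs' b r (by simpa [pvStrLoopA] using h); simp; omega)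
        | (subst h2; simp [pvStrLoopA] at h; simp [h.2.symm])
        | (have hh : pvStrLoopA (buf ++ [c]) cs = some (b, r) := by
             cases cs with
             | nil => simpa [pvStrLoopA, h1, h2] using h
             | cons d cs' => simpa [pvStrLoopA, h1, h2] using h
           have := pvStrLoopA_lt (buf ++ [c]) cs b r hh
           simp; omega)

-- the comment-skip while: advance while the char is not '\n'
def pvSkipLineA : List Char → List Char
  | [] => []
  | c :: cs => if c = '\n' then c :: cs else pvSkipLineA cs

theorem pvSkipLineA_le : ∀ (l : List Char), (pvSkipLineA l).length ≤ l.length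
  | [] => le_refl _
  | c :: cs => by
      simp only [pvSkipLineA]
      split
      · simp
      · have := pvSkipLineA_le cs; simp; omega

-- the main while loop of A, index i represented by the remaining suffix
def pvLoopA : List Char → List String → List String
  | [], tokens => tokens
  | c :: cs, tokens =>
    if PySem.Chars.isspace c then pvLoopA cs tokens
    else match c, cs with
      | '/', '/' :: cs' => pvLoopA (pvSkipLineA cs') tokens   -- the two known '/' ≠ '\n' steps unrolled
      | '{', rest => pvLoopA rest (tokens ++ ["{"])
      | '}', rest => pvLoopA rest (tokens ++ ["}"])
      | '"', rest =>
        match h : pvStrLoopA [] rest with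
        | some (buf, rest') => pvLoopA rest' (tokens ++ [String.mk buf])
        | none => tokens                                      -- raise ValueError("Unclosed quote in VDF")
      | _, _ => tokens                                        -- raise ValueError("Unexpected VDF character …")
  termination_by l _ => l.length
  decreasing_by
  · simp only [List.length_cons]; omega
  · have := pvSkipLineA_le cs'; simp only [List.length_cons]; omega
  · simp only [List.length_cons]; omega
  · simp only [List.length_cons]; omega
  · have := pvStrLoopA_lt [] rest buf rest' h; simp only [List.length_cons]; omega

def tokenize_vdf (text : String) : List String := pvLoopA text.toList []

-- ===== PORT B =====
-- _unescape: drop each backslash together with nothing, keeping the escaped char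
def pvUnescB : List Char → List Char
  | [] => []
  | '\\' :: d :: cs => d :: pvUnescB cs
  | c :: cs => c :: pvUnescB cs

-- the whitespace run 'while j < n and text[j].isspace(): j += 1' (suffix at j)
def pvSkipWsB : List Char → List Char
  | [] => []
  | c :: cs => if PySem.Chars.isspace c then pvSkipWsB cs else c :: cs

theorem pvSkipWsB_le : ∀ (l : List Char), (pvSkipWsB l).length ≤ l.length
  | [] => le_refl _
  | c :: cs => by
      simp only [pvSkipWsB]
      split
      · have := pvSkipWsB_le cs; simp; omega
      · simp

-- text.find('\n', pos): suffix from the first '\n' ([] when find returns -1, i.e. new_pos = n)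
def pvFindNlB : List Char → List Char
  | [] => []
  | c :: cs => if c = '\n' then c :: cs else pvFindNlB cs

theorem pvFindNlB_le : ∀ (l : List Char), (pvFindNlB l).length ≤ l.length
  | [] => le_refl _
  | c :: cs => by
      simp only [pvFindNlB]
      split
      · simp
      · have := pvFindNlB_le cs; simp; omega

-- the closing-quote scan of the '"' branch (j += 2 on backslash); the slice text[pos+1:j]
-- is returned as the raw char list collected along the way (the list form of the slice)
def pvScanStrB : List Char → Option (List Char × List Char)
  | [] => none
  | '"' :: cs => some ([], cs)
  | '\\' :: d :: cs => (pvScanStrB cs).map (fun p => ('\\' :: d :: p.1, p.2))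
  | c :: cs => (pvScanStrB cs).map (fun p => (c :: p.1, p.2))

theorem pvScanStrB_lt : ∀ (l raw r : List Char), pvScanStrB l = some (raw, r) → r.length < l.length
  | [], _, _, h => by simp [pvScanStrB] at h
  | '"' :: cs, raw, r, h => by simp [pvScanStrB] at h; simp [h.2.symm]
  | '\\' :: d :: cs, raw, r, h => by
      simp only [pvScanStrB, Option.map_eq_some_iff] at h
      obtain ⟨⟨raw', r'⟩, hp, he⟩ := h
      have := pvScanStrB_lt cs raw' r' hp
      cases he; simp; omega
  | c :: cs, raw, r, h => by
      by_cases h1 : c = '\\' <;> by_cases h2 : c = '"'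
      all_goals first
        | (exact absurd (h1.symm.trans h2) (by decide))
        | (subst h2; simp [pvScanStrB] at h; simp [h.2.symm])
        | (subst h1; cases cs with
            | nil => simp [pvScanStrB] at h
            | cons d cs' =>
              simp only [pvScanStrB, Option.map_eq_some_iff] at h
              obtain ⟨⟨raw', r'⟩, hp, he⟩ := h
              have := pvScanStrB_lt cs' raw' r' hp
              cases he; simp; omega)
        | (have hh : (pvScanStrB cs).map (fun p => (c :: p.1, p.2)) = some (raw, r) := by
             cases cs with
             | nil => simpa [pvScanStrB, h1, h2] using h
             | cons d cs' => simpa [pvScanStrB, h1, h2] using h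
           simp only [Option.map_eq_some_iff] at hh
           obtain ⟨⟨raw', r'⟩, hp, he⟩ := hh
           have := pvScanStrB_lt cs raw' r' hp
           cases he; simp; omega)

-- _next_lexeme: some (token?, rest) for the lexeme at the front, none = lexical error
def pvNextB (c : Char) (cs : List Char) : Option (Option String × List Char) :=
    if PySem.Chars.isspace c then some (none, pvSkipWsB cs)
    else match c, cs with
      | '/', '/' :: cs' => some (none, pvFindNlB cs')
      | '{', _ => some (some "{", cs)
      | '}', _ => some (some "}", cs)
      | '"', _ => (pvScanStrB cs).map (fun p => (some (String.mk (pvUnescB p.1)), p.2))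
      | _, _ => none

theorem pvNextB_lt (c : Char) (cs : List Char) (t : Option String) (r : List Char)
    (h : pvNextB c cs = some (t, r)) : r.length < cs.length + 1 := by
  rw [pvNextB.eq_def] at h
  split at h
  · cases h
    have := pvSkipWsB_le cs
    omega
  · split at h
    · rename_i cs' heq
      cases h
      have := pvFindNlB_le cs'
      simp only [List.length_cons]
      omega
    · cases h; simp
    · cases h; simp
    · simp only [Option.map_eq_some_iff] at h
      obtain ⟨⟨raw', r'⟩, hp, he⟩ := h
      have := pvScanStrB_lt _ raw' r' hp
      cases he
      simpa using by omega
    · cases h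

-- the main while loop of B
def pvLoopB : List Char → List String → List String
  | [], tokens => tokens
  | c :: cs, tokens =>
    match h : pvNextB c cs with
    | none => tokens                                          -- the two raise branches
    | some (none, rest) => pvLoopB rest tokens
    | some (some s, rest) => pvLoopB rest (tokens ++ [s])
  termination_by l _ => l.length
  decreasing_by
  · exact pvNextB_lt c cs none rest h
  · exact pvNextB_lt c cs (some s) rest h

def tokenize_vdf_alt (text : String) : List String := pvLoopB text.toList []

-- ===== PRECONDITION & SPEC =====
-- Pre_ excludes exactly the inputs on which A raises ValueError (an unquoted/unexpected
-- character, a lone '/', or an unclosed quoted string); B raises there too.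
-- DFA over the text: top level / inside a quoted string; comments and escapes
-- are handled by consuming '//'…'\n' and '\\'+char transitions
inductive PvVdfSt
  | top
  | comment
  | str
  deriving DecidableEq

def pvVdfRun : PvVdfSt → List Char → Bool
  | .top, [] => true
  | .top, '{' :: cs => pvVdfRun .top cs
  | .top, '}' :: cs => pvVdfRun .top cs
  | .top, '/' :: '/' :: cs => pvVdfRun .comment cs
  | .top, '"' :: cs => pvVdfRun .str cs
  | .top, c :: cs => PySem.Chars.isspace c && pvVdfRun .top cs
  | .comment, [] => true
  | .comment, '\n' :: cs => pvVdfRun .top cs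
  | .comment, _ :: cs => pvVdfRun .comment cs
  | .str, [] => false
  | .str, '\\' :: _ :: cs => pvVdfRun .str cs
  | .str, '"' :: cs => pvVdfRun .top cs
  | .str, _ :: cs => pvVdfRun .str cs

def Pre_tokenize_vdf (text : String) : Prop := pvVdfRun .top text.toList = true
instance (text : String) : Decidable (Pre_tokenize_vdf text) := by unfold Pre_tokenize_vdf; infer_instance
def pvWitness_tokenize_vdf : String := "\"k\" { \"a\\\"b\" } // c"

def Spec_tokenize_vdf (text : String) (out : List String) : Prop := out = tokenize_vdf_alt text
instance (text : String) (out : List String) : Decidable (Spec_tokenize_vdf text out) := by unfold Spec_tokenize_vdf; infer_instance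

-- ===== CLAIM (what is proved, stated in full; the proofs are below) =====
def Claim_equal_tokenize_vdf : Prop := ∀ (text : String), Dom_tokenize_vdf text → Pre_tokenize_vdf text → Spec_tokenize_vdf text (tokenize_vdf text)

-- ===== LEMMAS AND PROOFS =====

theorem pvUnescB_cons_ne (c : Char) (l : List Char) (h : c ≠ '\\') :
    pvUnescB (c :: l) = c :: pvUnescB l := by
  cases l with
  | nil => simp [pvUnescB, h]
  | cons d cs => simp [pvUnescB, h]

theorem pvStrLoopA_cons_ne (buf : List Char) (c : Char) (cs : List Char) (h : c ≠ '\\') (h2 : c ≠ '"') :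
    pvStrLoopA buf (c :: cs) = pvStrLoopA (buf ++ [c]) cs := by
  cases cs with
  | nil => simp [pvStrLoopA, h, h2]
  | cons d cs' => simp [pvStrLoopA, h, h2]

theorem pvScanStrB_cons_ne (c : Char) (cs : List Char) (h : c ≠ '\\') (h2 : c ≠ '"') :
    pvScanStrB (c :: cs) = (pvScanStrB cs).map (fun p => (c :: p.1, p.2)) := by
  cases cs with
  | nil => simp [pvScanStrB, h, h2]
  | cons d cs' => simp [pvScanStrB, h, h2]

theorem pv_strLoop_eq_scan : ∀ (l buf : List Char),
    pvStrLoopA buf l = (pvScanStrB l).map (fun p => (buf ++ pvUnescB p.1, p.2)) := by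
  intro l
  induction l using pvScanStrB.induct with
  | case1 => intro buf; simp [pvStrLoopA, pvScanStrB]
  | case2 cs => intro buf; simp [pvStrLoopA, pvScanStrB, pvUnescB]
  | case3 d cs ih =>
      intro buf
      simp only [pvStrLoopA, pvScanStrB, ih]
      cases hp : pvScanStrB cs <;> simp [pvUnescB]
  | case4 c cs h1 h2 ih =>
      intro buf
      by_cases hb : c = '\\'
      · subst hb
        cases cs with
        | nil => simp [pvStrLoopA, pvScanStrB]
        | cons d cs' => exact absurd (h2 d cs' rfl rfl) (fun h => h)
      · have h1' : c ≠ '"' := fun h => h1 h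
        rw [pvStrLoopA_cons_ne buf c cs hb h1', pvScanStrB_cons_ne c cs hb h1', ih]
        cases hp : pvScanStrB cs <;> simp [pvUnescB_cons_ne c _ hb]

theorem pvSkipLineA_eq_findNl : ∀ (l : List Char), pvSkipLineA l = pvFindNlB l
  | [] => rfl
  | c :: cs => by
      simp only [pvSkipLineA, pvFindNlB]
      split
      · rfl
      · exact pvSkipLineA_eq_findNl cs

theorem pvLoopA_skipWs : ∀ (l : List Char) (t : List String), pvLoopA l t = pvLoopA (pvSkipWsB l) t
  | [], t => rfl
  | c :: cs, t => by
      by_cases hs : PySem.Chars.isspace c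
      · have h1 : pvLoopA (c :: cs) t = pvLoopA cs t := by
          rw [pvLoopA.eq_def]; simp [hs]
        rw [h1, pvSkipWsB, if_pos hs]
        exact pvLoopA_skipWs cs t
      · rw [pvSkipWsB, if_neg hs]
  termination_by l _ => l.length

theorem pv_loops_eq (l : List Char) : ∀ (t : List String), pvLoopA l t = pvLoopB l t := by
  induction hn : l.length using Nat.strong_induction_on generalizing l with
  | _ n IH =>
    intro t
    subst hn
    cases l with
    | nil => rw [pvLoopA.eq_def, pvLoopB.eq_def]
    | cons c cs =>
      have hB : pvLoopB (c :: cs) t = (match pvNextB c cs with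
          | none => t
          | some (none, rest) => pvLoopB rest t
          | some (some s, rest) => pvLoopB rest (t ++ [s])) := by
        rw [pvLoopB.eq_def]
        split
        · rename_i h; simp at h
        · rename_i t' c' cs' h
          injection h with h1 h2
          subst h1; subst h2
          split <;> rename_i hN <;> rw [hN]
      by_cases hs : PySem.Chars.isspace c
      · have hA : pvLoopA (c :: cs) t = pvLoopA cs t := by rw [pvLoopA.eq_def]; simp [hs]
        have hN : pvNextB c cs = some (none, pvSkipWsB cs) := by rw [pvNextB.eq_def]; simp [hs]
        rw [hA, pvLoopA_skipWs cs t, hB, hN]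
        have := pvSkipWsB_le cs
        exact IH (pvSkipWsB cs).length (by simp; omega) _ rfl t
      · by_cases h1 : c = '{'
        · subst h1
          have hA : pvLoopA ('{' :: cs) t = pvLoopA cs (t ++ ["{"]) := by
            rw [pvLoopA.eq_def]; simp [hs]
          have hN : pvNextB '{' cs = some (some "{", cs) := by
            rw [pvNextB.eq_def]; simp [hs]
          rw [hA, hB, hN]
          exact IH cs.length (by simp) _ rfl _
        by_cases h2 : c = '}'
        · subst h2
          have hA : pvLoopA ('}' :: cs) t = pvLoopA cs (t ++ ["}"]) := by
            rw [pvLoopA.eq_def]; simp [hs]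
          have hN : pvNextB '}' cs = some (some "}", cs) := by
            rw [pvNextB.eq_def]; simp [hs]
          rw [hA, hB, hN]
          exact IH cs.length (by simp) _ rfl _
        by_cases h3 : c = '"'
        · subst h3
          cases hp : pvScanStrB cs with
          | none =>
            have hsl : pvStrLoopA [] cs = none := by rw [pv_strLoop_eq_scan, hp]; rfl
            have hA : pvLoopA ('"' :: cs) t = t := by
              rw [pvLoopA.eq_def]; simp only [if_neg hs]; split <;> simp_all
            have hN : pvNextB '"' cs = none := by rw [pvNextB.eq_def]; simp [hs, hp]
            rw [hA, hB, hN]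
          | some p =>
            obtain ⟨raw, rest⟩ := p
            have hsl : pvStrLoopA [] cs = some (pvUnescB raw, rest) := by
              rw [pv_strLoop_eq_scan, hp]; rfl
            have hA : pvLoopA ('"' :: cs) t = pvLoopA rest (t ++ [String.mk (pvUnescB raw)]) := by
              rw [pvLoopA.eq_def]; simp only [if_neg hs]; split <;> simp_all
            have hN : pvNextB '"' cs = some (some (String.mk (pvUnescB raw)), rest) := by
              rw [pvNextB.eq_def]; simp [hs, hp]
            rw [hA, hB, hN]
            exact IH rest.length (by have := pvScanStrB_lt cs raw rest hp; simp; omega) _ rfl _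
        by_cases h4 : c = '/'
        · subst h4
          cases cs with
          | nil =>
            have hA : pvLoopA ['/'] t = t := by rw [pvLoopA.eq_def]; simp [hs]
            have hN : pvNextB '/' [] = none := by rw [pvNextB.eq_def]; simp [hs]
            rw [hA, hB, hN]
          | cons c2 cs2 =>
            by_cases h5 : c2 = '/'
            · subst h5
              have hA : pvLoopA ('/' :: '/' :: cs2) t = pvLoopA (pvSkipLineA cs2) t := by
                rw [pvLoopA.eq_def]; simp [hs]
              have hN : pvNextB '/' ('/' :: cs2) = some (none, pvFindNlB cs2) := by
                rw [pvNextB.eq_def]; simp [hs]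
              rw [hA, hB, hN, pvSkipLineA_eq_findNl]
              exact IH (pvFindNlB cs2).length (by have := pvFindNlB_le cs2; simp; omega) _ rfl _
            · have hA : pvLoopA ('/' :: c2 :: cs2) t = t := by
                rw [pvLoopA.eq_def]; simp [hs, h5]
              have hN : pvNextB '/' (c2 :: cs2) = none := by
                rw [pvNextB.eq_def]; simp [hs, h5]
              rw [hA, hB, hN]
        · have hA : pvLoopA (c :: cs) t = t := by
            rw [pvLoopA.eq_def]; simp only [if_neg hs]
            split <;> simp_all
          have hN : pvNextB c cs = none := by
            rw [pvNextB.eq_def]; simp only [if_neg hs]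
            split <;> simp_all
          rw [hA, hB, hN]

-- ===== VERDICT (by name: the statement is the Claim_ definition above) =====
theorem tokenize_vdf_spec : Claim_equal_tokenize_vdf := by
  intro text _ _
  unfold Spec_tokenize_vdf tokenize_vdf tokenize_vdf_alt
  exact pv_loops_eq text.toList []
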